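-- pv_equiv track=rewrite | github.com/BasselOthman/Ocr-project | src/OCR_robust.py | fix_spacing
-- ===== SOURCE A (Python) =====
-- def fix_spacing(text):
--     words = text.split(" ")
--     new_words = []
--     buffer = []
--     for w in words:
--         if not w: continue
--         if len(w) == 1:
--             buffer.append(w)
--         else:
--             if len(buffer) > 1:
--                 new_words.append("".join(buffer))
--                 buffer = []
--             elif len(buffer) == 1:
--                 new_words.append(buffer[0])
--                 buffer = []
--             new_words.append(w)
--     if len(buffer) > 1:
--         new_words.append("".join(buffer))
--     elif len(buffer) == 1:
--         new_words.append(buffer[0])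
--     return " ".join(new_words)
-- ===== SOURCE B (Python) =====
-- def fix_spacing(text):
--     words = [w for w in text.split(" ") if w]
--     out = []
--     i = 0
--     n = len(words)
--     while i < n:
--         if len(words[i]) == 1:
--             j = i + 1
--             while j < n and len(words[j]) == 1:
--                 j += 1
--             out.append("".join(words[i:j]))
--             i = j
--         else:
--             out.append(words[i])
--             i += 1
--     return " ".join(out)
-- ===== Notes on version B (the rewrite author's own statement) =====
-- stated objective: simpler
-- what changed: Replaces A's stateful buffer/flush accumulator (duplicated three-way flush logic inside and after the loop) with a pre-filter of empty tokens followed by a run scanner that joins each maximal run of single-char tokens in one step.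
import Mathlib
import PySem

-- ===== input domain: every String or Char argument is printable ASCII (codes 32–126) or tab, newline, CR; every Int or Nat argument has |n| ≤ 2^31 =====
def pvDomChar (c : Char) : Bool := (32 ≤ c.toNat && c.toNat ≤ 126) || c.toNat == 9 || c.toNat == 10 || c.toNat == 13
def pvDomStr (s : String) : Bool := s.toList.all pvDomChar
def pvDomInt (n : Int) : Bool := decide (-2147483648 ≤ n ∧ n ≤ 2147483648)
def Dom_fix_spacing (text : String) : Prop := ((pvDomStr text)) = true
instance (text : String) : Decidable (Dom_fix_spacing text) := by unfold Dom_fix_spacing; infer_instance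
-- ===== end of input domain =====

-- B replaces A's stateful buffer/flush accumulator with a pre-filter of empty tokens and a
-- run scanner joining each maximal run of single-char tokens; objective: simpler, same O(n) cost.


-- ===== PORT A =====
-- the flush code A duplicates (inside the loop's else-branch and after the loop) as a helper;
-- buffer[0] is guarded by len(buffer) == 1, so pyGet? is in range and the .getD default is never used
def flushA (nw buf : List String) : List String :=
  if buf.length > 1 then nw ++ [PySem.Str.join "" buf]
  else if buf.length = 1 then nw ++ [(PySem.List.pyGet? buf 0).getD ""]
  else nw

def stepA (st : List String × List String) (w : String) : List String × List String :=
  if w = "" then st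
  else if PySem.Str.len w = 1 then (st.1, st.2 ++ [w])
  else (flushA st.1 st.2 ++ [w], [])

-- text.split(" ") with the non-empty literal separator: split? never returns none here
def fix_spacing (text : String) : String :=
  let words := (PySem.Str.split? text " ").getD []
  let st := words.foldl stepA ([], [])
  PySem.Str.join " " (flushA st.1 st.2)

-- ===== PORT B =====
-- B's outer while loop walks the suffix of the filtered word list; its inner while loop that
-- extends a run of single-char tokens is the takeWhile/dropWhile split of that suffix
def runScan : List String → List String
  | [] => []
  | w :: ws =>
    if PySem.Str.len w = 1 then
      PySem.Str.join "" (w :: ws.takeWhile (fun x => PySem.Str.len x == 1)) ::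
        runScan (ws.dropWhile (fun x => PySem.Str.len x == 1))
    else w :: runScan ws
termination_by ws => ws.length
decreasing_by
  · exact Nat.lt_succ_of_le (List.length_dropWhile_le _ _)
  · exact Nat.lt_succ_self _

def fix_spacing_alt (text : String) : String :=
  PySem.Str.join " "
    (runScan (((PySem.Str.split? text " ").getD []).filter (fun w => !(w == ""))))

-- ===== PRECONDITION & SPEC =====
def Spec_fix_spacing (text : String) (out : String) : Prop := out = fix_spacing_alt text
instance (text : String) (out : String) : Decidable (Spec_fix_spacing text out) := by unfold Spec_fix_spacing; infer_instance

-- ===== CLAIM (what is proved, stated in full; the proofs are below) =====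
def Claim_equal_fix_spacing : Prop := ∀ (text : String), Dom_fix_spacing text → Spec_fix_spacing text (fix_spacing text)

-- ===== LEMMAS AND PROOFS =====

lemma join_empty_singleton (w : String) : PySem.Str.join "" [w] = w := by
  simp [PySem.Str.join, PySem.Chars.join_singleton]

-- A's three-way flush, written as one conditional append
lemma flushA_eq (nw buf : List String) :
    flushA nw buf = nw ++ (if buf = [] then [] else [PySem.Str.join "" buf]) := by
  match buf with
  | [] => simp [flushA]
  | [x] => simp [flushA, PySem.List.pyGet?, PySem.List.pyIdx?, join_empty_singleton]
  | x :: y :: t => simp [flushA]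

-- folding stepA skips empty tokens, so it equals the fold over the filtered list
lemma foldl_stepA_filter (ws : List String) (st : List String × List String) :
    ws.foldl stepA st = (ws.filter (fun w => !(w == ""))).foldl stepA st := by
  induction ws generalizing st with
  | nil => rfl
  | cons w ws ih =>
    by_cases hw : w = ""
    · subst hw
      simpa [stepA] using ih st
    · simp [hw, List.foldl_cons, ih]

lemma takeWhile_all_append (p : String → Bool) (bs rest : List String)
    (h : ∀ x ∈ bs, p x = true) :
    (bs ++ rest).takeWhile p = bs ++ rest.takeWhile p ∧
    (bs ++ rest).dropWhile p = rest.dropWhile p := by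
  induction bs with
  | nil => simp
  | cons b bs ih =>
    have hb := h b (by simp)
    have := ih (fun x hx => h x (by simp [hx]))
    simp [hb, this.1, this.2]

-- runScan on an all-single-char prefix followed by nothing or a non-single-char head:
-- the prefix becomes one joined word
lemma runScan_flush (bs rest : List String)
    (hbs : ∀ x ∈ bs, x.length = 1)
    (hrest : rest = [] ∨ ∃ w ws, rest = w :: ws ∧ ¬ w.length = 1) :
    runScan (bs ++ rest) =
      (if bs = [] then [] else [PySem.Str.join "" bs]) ++ runScan rest := by
  match bs with
  | [] => simp
  | b :: bs' =>
    have hb : b.length = 1 := hbs b (by simp)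
    have hall : ∀ x ∈ bs', (fun x => PySem.Str.len x == 1) x = true := by
      intro x hx; simp [hbs x (by simp [hx])]
    have htd := takeWhile_all_append (fun x => PySem.Str.len x == 1) bs' rest hall
    have htake : rest.takeWhile (fun x => PySem.Str.len x == 1) = [] := by
      rcases hrest with h | ⟨w, ws, h, hw⟩ <;> subst h
      · rfl
      · simp [hw]
    have hdrop : rest.dropWhile (fun x => PySem.Str.len x == 1) = rest := by
      rcases hrest with h | ⟨w, ws, h, hw⟩ <;> subst h
      · rfl
      · simp [hw]
    have hb' : PySem.Str.len b = 1 := by simpa using hb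
    show runScan (b :: (bs' ++ rest)) = _
    simp only [runScan]
    rw [if_pos hb', htd.1, htd.2, htake, hdrop]
    simp

-- the main loop invariant: running A's loop from state (nw, buf) and flushing equals
-- nw followed by B's run scan of the pending buffer and the remaining (non-empty) words
lemma main_inv (ws : List String) (nw buf : List String)
    (hbuf : ∀ x ∈ buf, x.length = 1)
    (hws : ∀ w ∈ ws, w ≠ "") :
    flushA (ws.foldl stepA (nw, buf)).1 (ws.foldl stepA (nw, buf)).2 =
      nw ++ runScan (buf ++ ws) := by
  induction ws generalizing nw buf with
  | nil =>
    simp only [List.foldl_nil, List.append_nil, flushA_eq]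
    rw [show buf = buf ++ [] by simp, runScan_flush buf [] hbuf (Or.inl rfl)]
    simp [runScan]
  | cons w ws ih =>
    have hw : w ≠ "" := hws w (by simp)
    by_cases hlen : w.length = 1
    · have hstep : stepA (nw, buf) w = (nw, buf ++ [w]) := by
        simp [stepA, hw, hlen]
      have := ih nw (buf ++ [w])
        (by intro x hx; rcases List.mem_append.mp hx with h | h
            · exact hbuf x h
            · simp_all)
        (fun x hx => hws x (by simp [hx]))
      rw [List.foldl_cons, hstep, this, List.append_assoc]
      rfl
    · have hstep : stepA (nw, buf) w = (flushA nw buf ++ [w], []) := by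
        simp [stepA, hw, hlen]
      have := ih (flushA nw buf ++ [w]) []
        (by intro x hx; simp at hx)
        (fun x hx => hws x (by simp [hx]))
      rw [List.foldl_cons, hstep, this,
        runScan_flush buf (w :: ws) hbuf (Or.inr ⟨w, ws, rfl, hlen⟩)]
      rw [show runScan (w :: ws) = w :: runScan ws by simp [runScan, hlen]]
      simp [flushA_eq]

-- ===== VERDICT (by name: the statement is the Claim_ definition above) =====
theorem fix_spacing_spec : Claim_equal_fix_spacing := by
  intro text _
  show fix_spacing text = fix_spacing_alt text
  simp only [fix_spacing, fix_spacing_alt]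
  rw [foldl_stepA_filter]
  have := main_inv (((PySem.Str.split? text " ").getD []).filter (fun w => !(w == ""))) [] []
    (by intro x hx; simp at hx)
    (by intro w hw; simpa using (List.mem_filter.mp hw).2)
  exact congrArg _ (by simpa using this)
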